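-- pv_equiv track=rewrite | github.com/Pufcorina/UBB-Computer-Science | Semester1/Algebra/all_subspaces/subspaces.py | sumVectors
-- ===== SOURCE A (Python) =====
-- def sumVectors(poz, vector, lst_index_vector):
--     """
--     Calculate the sum of a list of vectors
--
--     :param poz: the position in the vector of indexes ( for backtracking )
--     :param vector: list of vectors
--     :param lst_index_vector: an array of indexes for generating the combinations
--
--     :return: the sum of vectors
--     """
--     aux = lst_index_vector[:poz]
--     sum = [0] * len(vector[0])
--     for i in range(0, poz):
--         aux[i] = vector[lst_index_vector[i]]
--     for i in aux:
--         for m in range(0, len(i)):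
--             sum[m] = (sum[m] + i[m]) % 2
--     return sum
-- ===== SOURCE B (Python) =====
-- def _parity_mask(v):
--     """Pack the parity of each coordinate of v into an integer bitmask."""
--     bits = 0
--     for m in range(len(v)):
--         bits |= (v[m] % 2) << m
--     return bits
--
--
-- def sumVectors(poz, vector, lst_index_vector):
--     mask = 0
--     for i in range(poz):
--         mask ^= _parity_mask(vector[lst_index_vector[i]])
--     return [(mask >> m) & 1 for m in range(len(vector[0]))]
-- ===== Notes on version B (the rewrite author's own statement) =====
-- stated objective: alternative
-- what changed: Represents mod-2 vector addition as integer XOR: each selected vector's coordinate parities are packed into one integer bitmask, the masks are XOR-folded into a single accumulator, and the result is unpacked bit by bit, replacing A's slice-reuse placeholder and row-by-row in-place list accumulation.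
import Mathlib
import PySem

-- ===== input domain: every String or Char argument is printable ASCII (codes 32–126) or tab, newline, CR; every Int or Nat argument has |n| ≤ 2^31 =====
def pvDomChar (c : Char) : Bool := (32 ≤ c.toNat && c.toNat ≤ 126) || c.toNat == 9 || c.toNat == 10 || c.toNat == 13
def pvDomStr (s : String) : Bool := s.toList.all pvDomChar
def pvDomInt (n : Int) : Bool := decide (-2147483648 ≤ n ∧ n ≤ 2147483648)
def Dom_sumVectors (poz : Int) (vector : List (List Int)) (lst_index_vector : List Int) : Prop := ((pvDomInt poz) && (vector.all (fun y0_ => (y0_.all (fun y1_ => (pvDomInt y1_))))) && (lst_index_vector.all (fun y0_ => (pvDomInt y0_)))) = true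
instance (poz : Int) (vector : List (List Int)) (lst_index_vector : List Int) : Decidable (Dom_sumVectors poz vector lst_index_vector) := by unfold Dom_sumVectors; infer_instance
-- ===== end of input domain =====

-- B packs each selected vector's coordinate parities into an integer bitmask, XOR-folds the
-- masks and unpacks the bits, instead of A's slice-reuse placeholder and row-by-row in-place
-- list accumulation (alternative algorithm/data structure).

-- ===== PORT A =====
-- Python's `aux = lst_index_vector[:poz]` reuses the int slice as a placeholder that the
-- first loop overwrites cell by cell with vectors; the typed port uses a same-length list
-- of [] placeholders (a cell that is not overwritten is, in Python, never read without a
-- TypeError, which Pre_ excludes).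
def sumVectors (poz : Int) (vector : List (List Int)) (lst_index_vector : List Int) : List Int :=
  let aux0 : List (List Int) :=
    (PySem.List.slice lst_index_vector none (some poz)).map (fun _ => ([] : List Int))
  let aux : List (List Int) :=
    (PySem.List.pyRange 0 poz 1).foldl
      (fun a i => PySem.List.pySetD a i
        (PySem.List.pyGetD vector (PySem.List.pyGetD lst_index_vector i 0) []))
      aux0
  let sum0 : List Int := List.replicate (PySem.List.pyGetD vector 0 []).length 0
  aux.foldl
    (fun s i =>
      (PySem.List.pyRange 0 (i.length : Int) 1).foldl
        (fun s m =>
          PySem.List.pySetD s m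
            (PySem.Int.mod (PySem.List.pyGetD s m 0 + PySem.List.pyGetD i m 0) 2))
        s)
    sum0

-- ===== PORT B =====
-- `for m in range(len(v)): bits |= (v[m] % 2) << m`; the index m is always in range, so
-- v[m] is v.getD m 0 exactly.
def parityMask (v : List Int) : Int :=
  (List.range v.length).foldl
    (fun bits m => PySem.Int.bor bits ((PySem.Int.mod (v.getD m 0) 2) <<< m)) 0

def sumVectors_alt (poz : Int) (vector : List (List Int)) (lst_index_vector : List Int) : List Int :=
  let mask : Int :=
    (PySem.List.pyRange 0 poz 1).foldl
      (fun mask i =>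
        PySem.Int.bxor mask
          (parityMask (PySem.List.pyGetD vector (PySem.List.pyGetD lst_index_vector i 0) [])))
      0
  (List.range (PySem.List.pyGetD vector 0 []).length).map
    (fun (m : Nat) => PySem.Int.band (mask >>> m) 1)

-- ===== PRECONDITION & SPEC =====
-- Pre_ is exactly where the Python A returns normally: vector nonempty (else vector[0] is an
-- IndexError); and either 0 ≤ poz ≤ len(lst_index_vector) with every used index a valid
-- Python index into vector whose selected vector is no longer than vector[0] (else
-- IndexError), or poz < 0 with lst_index_vector[:poz] empty (a nonempty negative slice
-- leaves int placeholders in aux and len(i) raises TypeError).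
def Pre_sumVectors (poz : Int) (vector : List (List Int)) (lst_index_vector : List Int) : Prop :=
  vector ≠ [] ∧
  ((0 ≤ poz ∧ poz ≤ (lst_index_vector.length : Int) ∧
      ∀ j ∈ PySem.List.pyRange 0 poz 1,
        PySem.Raise.InRange vector.length (PySem.List.pyGetD lst_index_vector j 0) ∧
        (PySem.List.pyGetD vector (PySem.List.pyGetD lst_index_vector j 0) []).length ≤
          (PySem.List.pyGetD vector 0 []).length)
    ∨ (poz < 0 ∧ (lst_index_vector.length : Int) ≤ -poz))
instance (poz : Int) (vector : List (List Int)) (lst_index_vector : List Int) : Decidable (Pre_sumVectors poz vector lst_index_vector) := by unfold Pre_sumVectors; infer_instance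

def pvWitness_sumVectors : Int × List (List Int) × List Int := (2, [[1, 0], [0, 1], [1, 1]], [0, 2])

def Spec_sumVectors (poz : Int) (vector : List (List Int)) (lst_index_vector : List Int) (out : List Int) : Prop := out = sumVectors_alt poz vector lst_index_vector
instance (poz : Int) (vector : List (List Int)) (lst_index_vector : List Int) (out : List Int) : Decidable (Spec_sumVectors poz vector lst_index_vector out) := by unfold Spec_sumVectors; infer_instance

-- ===== CLAIM (what is proved, stated in full; the proofs are below) =====
def Claim_equal_sumVectors : Prop := ∀ (poz : Int) (vector : List (List Int)) (lst_index_vector : List Int), Dom_sumVectors poz vector lst_index_vector → Pre_sumVectors poz vector lst_index_vector → Spec_sumVectors poz vector lst_index_vector (sumVectors poz vector lst_index_vector)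

-- ===== LEMMAS AND PROOFS =====

-- the common column-sum normal form both ports are reduced to
def colForm (poz : Int) (vector : List (List Int)) (lst_index_vector : List Int) : List Int :=
  let selected : List (List Int) :=
    (PySem.List.pyRange 0 poz 1).map
      (fun i => PySem.List.pyGetD vector (PySem.List.pyGetD lst_index_vector i 0) [])
  (List.range (PySem.List.pyGetD vector 0 []).length).map
    (fun (m : Nat) =>
      PySem.Int.mod
        (selected.foldl
          (fun acc v => if (m : Int) < (v.length : Int) then acc + PySem.List.pyGetD v (m : Int) 0 else acc)
          0)
        2)

-- a list is the range-indexed map of its own getD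
theorem map_getD_range {α : Type} (s : List α) (d : α) :
    (List.range s.length).map (fun j => s.getD j d) = s := by
  apply List.ext_getElem (by simp)
  intro i h1 h2
  simp [List.getD, List.getElem?_eq_getElem h2]

-- the write loop `for i in range(k): t[i] = g(i, t[i])` as a pointwise map
theorem writeLoop {α : Type} (g : Int → α → α) (d : α) (k : Nat) (s : List α)
    (hk : k ≤ s.length) :
    (PySem.List.pyRange 0 (k : Int) 1).foldl
        (fun t i => PySem.List.pySetD t i (g i (PySem.List.pyGetD t i d))) s =
      (List.range s.length).map
        (fun j => if j < k then g (j : Int) (s.getD j d) else s.getD j d) := by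
  induction k with
  | zero =>
    rw [show ((0:Nat):Int) = 0 from rfl, PySem.List.pyRange_one_eq_nil le_rfl]
    simp only [List.foldl_nil, Nat.not_lt_zero, if_false]
    exact (map_getD_range s d).symm
  | succ k ih =>
    have hk' : k ≤ s.length := Nat.le_of_succ_le hk
    have hkl : k < s.length := hk
    rw [show ((k+1:Nat):Int) = (k:Int) + 1 by push_cast; ring,
        PySem.List.pyRange_one_succ_right (by positivity), List.foldl_append,
        ih hk']
    set prev := (List.range s.length).map (fun j => if j < k then g (j : Int) (s.getD j d) else s.getD j d) with hprev
    have hlen : prev.length = s.length := by simp [hprev]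
    have hget : PySem.List.pyGetD prev (k : Int) d = s.getD k d := by
      rw [PySem.List.pyGetD_natCast, List.getD_eq_getElem prev d (by omega)]
      simp [hprev, hkl]
    simp only [List.foldl_cons, List.foldl_nil, PySem.List.pySetD_natCast, hget]
    apply List.ext_getElem (by simp [hlen])
    intro j hj1 hj2
    rw [List.getElem_set]
    by_cases hjk : k = j
    · subst hjk; simp [hkl]
    · simp only [hjk, if_false, hprev, List.getElem_map, List.getElem_range]
      have hj : j < s.length := by simpa [hlen] using hj1
      by_cases h1 : j < k
      · simp [h1, Nat.lt_succ_of_lt h1]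
      · have : ¬ j < k + 1 := by omega
        simp [h1, this]

-- shifting the initial accumulator out of the column-sum fold
theorem colShift (rows : List (List Int)) (m a : Int) :
    rows.foldl (fun acc v => if m < (v.length : Int) then acc + PySem.List.pyGetD v m 0 else acc) a
    = a + rows.foldl (fun acc v => if m < (v.length : Int) then acc + PySem.List.pyGetD v m 0 else acc) 0 := by
  induction rows generalizing a with
  | nil => simp
  | cons r rows ih =>
    simp only [List.foldl_cons]
    rw [ih, ih (if m < (r.length : Int) then 0 + PySem.List.pyGetD r m 0 else 0)]
    split_ifs <;> ring

-- A's row loop, started from a state that is columnwise `c % 2`, ends columnwise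
-- `(c + column sum) % 2` — the bridge from row-major accumulation to column sums
theorem rowLoop (rows : List (List Int)) (n : Nat) (c : Nat → Int)
    (hlen : ∀ r ∈ rows, r.length ≤ n) :
    rows.foldl
        (fun s i =>
          (PySem.List.pyRange 0 (i.length : Int) 1).foldl
            (fun s m =>
              PySem.List.pySetD s m
                (PySem.Int.mod (PySem.List.pyGetD s m 0 + PySem.List.pyGetD i m 0) 2))
            s)
        ((List.range n).map (fun m => PySem.Int.mod (c m) 2)) =
      (List.range n).map
        (fun m => PySem.Int.mod
          (c m + rows.foldl
            (fun acc v => if (m : Int) < (v.length : Int) then acc + PySem.List.pyGetD v (m : Int) 0 else acc)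
            0) 2) := by
  induction rows generalizing c with
  | nil => simp
  | cons r rows ih =>
    have hr : r.length ≤ n := hlen r (by simp)
    simp only [List.foldl_cons]
    rw [writeLoop (fun i v => PySem.Int.mod (v + PySem.List.pyGetD r i 0) 2) 0 r.length _ (by simp; omega)]
    have hstate : (List.range ((List.range n).map (fun m => PySem.Int.mod (c m) 2)).length).map
        (fun j => if j < r.length
          then PySem.Int.mod (((List.range n).map (fun m => PySem.Int.mod (c m) 2)).getD j 0 + PySem.List.pyGetD r (j:Int) 0) 2
          else ((List.range n).map (fun m => PySem.Int.mod (c m) 2)).getD j 0)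
        = (List.range n).map (fun m => PySem.Int.mod
            ((fun j => c j + (if (j:Int) < (r.length:Int) then PySem.List.pyGetD r (j:Int) 0 else 0)) m) 2) := by
      apply List.ext_getElem (by simp)
      intro j hj1 hj2
      have hjn : j < n := by simpa using hj2
      have hgetD : ((List.range n).map (fun m => PySem.Int.mod (c m) 2)).getD j 0 = PySem.Int.mod (c j) 2 := by
        rw [List.getD_eq_getElem _ _ (by simpa using hjn)]; simp
      simp only [List.getElem_map, List.getElem_range, hgetD]
      by_cases h1 : j < r.length
      · have h2 : ((j:Nat):Int) < (r.length:Int) := by exact_mod_cast h1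
        simp [h1, h2]
      · have h2 : ¬ ((j:Nat):Int) < (r.length:Int) := by exact_mod_cast h1
        simp [h1, h2]
    rw [hstate, ih _ (fun r hr' => hlen r (by simp [hr']))]
    apply List.ext_getElem (by simp)
    intro j hj1 hj2
    simp only [List.getElem_map, List.getElem_range, colShift rows _ (if ((j:Nat):Int) < (r.length:Int) then 0 + PySem.List.pyGetD r (j:Int) 0 else 0)]
    congr 1
    split_ifs <;> ring

-- A reduced to the column-sum normal form, on every input admitted by Pre_
theorem sumVectors_eq_colForm (poz : Int) (vector : List (List Int)) (lst : List Int)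
    (_hv : vector ≠ [])
    (hcase : (0 ≤ poz ∧ poz ≤ (lst.length : Int) ∧
      ∀ j ∈ PySem.List.pyRange 0 poz 1,
        PySem.Raise.InRange vector.length (PySem.List.pyGetD lst j 0) ∧
        (PySem.List.pyGetD vector (PySem.List.pyGetD lst j 0) []).length ≤
          (PySem.List.pyGetD vector 0 []).length)
    ∨ (poz < 0 ∧ (lst.length : Int) ≤ -poz)) :
    sumVectors poz vector lst = colForm poz vector lst := by
  simp only [sumVectors, colForm]
  rcases hcase with ⟨h0, hle, hidx⟩ | ⟨hneg, hlen2⟩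
  · obtain ⟨p, rfl⟩ : ∃ p : Nat, poz = (p : Int) := ⟨poz.toNat, (Int.toNat_of_nonneg h0).symm⟩
    have hp : p ≤ lst.length := by exact_mod_cast hle
    have haux0len : ((PySem.List.slice lst none (some (p:Int))).map (fun _ => ([] : List Int))).length = p := by
      rw [PySem.List.slice_to_natCast]
      simp [Nat.min_eq_left hp]
    have hw := writeLoop (fun i _ => PySem.List.pyGetD vector (PySem.List.pyGetD lst i 0) [])
      ([] : List Int) p ((PySem.List.slice lst none (some (p:Int))).map (fun _ => ([] : List Int)))
      (by omega)
    simp only [] at hw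
    rw [hw, haux0len]
    have hauxmap :
        (List.range p).map (fun (j : Nat) =>
          if j < p
          then PySem.List.pyGetD vector (PySem.List.pyGetD lst (j:Int) 0) []
          else ((PySem.List.slice lst none (some (p:Int))).map (fun _ => ([] : List Int))).getD j [])
        = (List.range p).map (fun (j : Nat) => PySem.List.pyGetD vector (PySem.List.pyGetD lst (j:Int) 0) []) := by
      apply List.map_congr_left
      intro j hj
      simp [List.mem_range.mp hj]
    rw [hauxmap]
    have hsum0 : List.replicate (PySem.List.pyGetD vector 0 []).length (0:Int)
        = (List.range (PySem.List.pyGetD vector 0 []).length).map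
            (fun m => PySem.Int.mod ((fun _ : Nat => (0:Int)) m) 2) := by
      simp [List.map_const']
    have hlenrows : ∀ r ∈ (List.range p).map
        (fun (j : Nat) => PySem.List.pyGetD vector (PySem.List.pyGetD lst (j:Int) 0) []),
        r.length ≤ (PySem.List.pyGetD vector 0 []).length := by
      intro r hr
      simp only [List.mem_map, List.mem_range] at hr
      obtain ⟨j, hj, rfl⟩ := hr
      have hmem : (j : Int) ∈ PySem.List.pyRange 0 (p:Int) 1 := by
        rw [PySem.List.mem_pyRange_one]
        exact ⟨Int.natCast_nonneg j, by exact_mod_cast hj⟩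
      exact (hidx (j:Int) hmem).2
    rw [hsum0, rowLoop _ _ _ hlenrows]
    rw [PySem.List.pyRange_zero_natCast p, List.map_map]
    apply List.map_congr_left
    intro m _
    simp [Function.comp_def]
  · rw [PySem.List.pyRange_one_eq_nil (le_of_lt hneg), List.foldl_nil]
    have hsl : PySem.List.slice lst none (some poz) = ([] : List Int) := by
      obtain ⟨k, hk, rfl⟩ : ∃ k : Nat, 0 < k ∧ poz = -(k:Int) :=
        ⟨(-poz).toNat, by omega, by omega⟩
      rw [PySem.List.slice_to_neg_natCast _ _ hk]
      have h0 : lst.length - k = 0 := by omega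
      simp [h0]
    rw [hsl]
    simp [List.map_const']

-- ---- B side: from bitmask XOR to column sums ----

-- the Nat shadow of parityMask
def parityMaskN (v : List Int) : Nat :=
  (List.range v.length).foldl
    (fun bits m => bits ||| ((PySem.Int.mod (v.getD m 0) 2).toNat <<< m)) 0

theorem mod2_mem (x : Int) : PySem.Int.mod x 2 = 0 ∨ PySem.Int.mod x 2 = 1 := by
  have h1 := PySem.Int.mod_nonneg x (b := 2) (by omega)
  have h2 := PySem.Int.mod_lt x (b := 2) (by omega)
  omega

theorem mod2_cast (x : Int) : PySem.Int.mod x 2 = ((PySem.Int.mod x 2).toNat : Int) := by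
  rcases mod2_mem x with h | h <;> rw [h] <;> rfl

-- parityMask is the cast of its Nat shadow
theorem parityMask_cast (v : List Int) : parityMask v = (parityMaskN v : Int) := by
  simp only [parityMask, parityMaskN]
  generalize (List.range v.length) = l
  have key : ∀ (l : List Nat) (b : Nat),
      l.foldl (fun bits m => PySem.Int.bor bits ((PySem.Int.mod (v.getD m 0) 2) <<< m)) (b : Int)
      = ((l.foldl (fun bits m => bits ||| ((PySem.Int.mod (v.getD m 0) 2).toNat <<< m)) b : Nat) : Int) := by
    intro l
    induction l with
    | nil => intro b; simp
    | cons m l ih =>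
      intro b
      simp only [List.foldl_cons]
      rw [mod2_cast (v.getD m 0),
          show (((PySem.Int.mod (v.getD m 0)  2).toNat : Int) <<< m)
             = (((PySem.Int.mod (v.getD m 0) 2).toNat <<< m : Nat) : Int) from Int.mem_toNat?.mp rfl,
          PySem.Int.bor_natCast, ih]
      simp only [Int.toNat_natCast]
  exact_mod_cast key l 0

-- which bits parityMaskN sets
theorem parityMaskN_testBit (v : List Int) (k : Nat) :
    (parityMaskN v).testBit k
      = (decide (k < v.length) && decide (PySem.Int.mod (v.getD k 0) 2 = 1)) := by
  have key : ∀ (n : Nat) (b : Nat),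
      (((List.range n).foldl
        (fun bits m => bits ||| ((PySem.Int.mod (v.getD m 0) 2).toNat <<< m)) b)).testBit k
      = (b.testBit k || (decide (k < n) && decide (PySem.Int.mod (v.getD k 0) 2 = 1))) := by
    intro n
    induction n with
    | zero => intro b; simp
    | succ n ih =>
      intro b
      rw [List.range_succ, List.foldl_append, List.foldl_cons, List.foldl_nil,
          Nat.testBit_or, ih]
      have hbit : (((PySem.Int.mod (v.getD n 0) 2).toNat <<< n)).testBit k
          = (decide (k = n) && decide (PySem.Int.mod (v.getD n 0) 2 = 1)) := by
        rcases mod2_mem (v.getD n 0) with hp | hp <;> rw [hp]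
        · simp
        · rw [show ((1:Int).toNat) = 1 from rfl, Nat.shiftLeft_eq, one_mul,
              Nat.testBit_two_pow]
          simp [eq_comm]
      rw [hbit]
      by_cases h1 : k < n
      · have h2 : k < n + 1 := by omega
        have h3 : k ≠ n := by omega
        simp [h1, h2, h3]
      · by_cases h3 : k = n
        · subst h3
          simp [Bool.or_comm]
        · have h2 : ¬ k < n + 1 := by omega
          simp [h1, h2, h3]
  rw [parityMaskN, key v.length 0]
  simp

-- parity of an integer sum as Bool xor
theorem mod2_add (c S : Int) :
    decide (PySem.Int.mod (c + S) 2 = 1)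
      = Bool.xor (decide (PySem.Int.mod c 2 = 1)) (decide (PySem.Int.mod S 2 = 1)) := by
  rw [PySem.Int.mod_eq_emod_of_pos (a := c + S) (b := 2) (by omega),
      PySem.Int.mod_eq_emod_of_pos (a := c) (b := 2) (by omega),
      PySem.Int.mod_eq_emod_of_pos (a := S) (b := 2) (by omega)]
  by_cases h1 : c % 2 = 1 <;> by_cases h2 : S % 2 = 1
  · have h3 : (c + S) % 2 = 0 := by omega
    simp [h1, h2, h3]
  · have h3 : (c + S) % 2 = 1 := by omega
    simp [h1, h2, h3]
  · have h3 : (c + S) % 2 = 1 := by omega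
    simp [h1, h2, h3]
  · have h3 : (c + S) % 2 = 0 := by omega
    simp [h1, h2, h3]

-- the XOR-fold of parity masks reads off the column-sum parities
theorem maskFold (rows : List (List Int)) (k : Nat) (a : Nat) :
    ((rows.foldl (fun m v => m ^^^ parityMaskN v) a)).testBit k
      = Bool.xor (a.testBit k)
          (decide (PySem.Int.mod
            (rows.foldl
              (fun acc v => if (k : Int) < (v.length : Int) then acc + PySem.List.pyGetD v (k : Int) 0 else acc)
              0) 2 = 1)) := by
  induction rows generalizing a with
  | nil =>
    simp
  | cons r rows ih =>
    simp only [List.foldl_cons]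
    rw [ih, Nat.testBit_xor, parityMaskN_testBit]
    simp only [colShift rows (k : Int)
      (if (k : Int) < (r.length : Int) then 0 + PySem.List.pyGetD r (k : Int) 0 else 0)]
    by_cases hk : (k : Int) < (r.length : Int)
    · have hk' : k < r.length := by exact_mod_cast hk
      simp only [if_pos hk, zero_add, mod2_add, PySem.List.pyGetD_natCast, hk',
        decide_true, Bool.true_and]
      rw [Bool.xor_assoc]
    · have hk' : ¬ k < r.length := by exact_mod_cast hk
      simp only [if_neg hk, zero_add]
      simp [hk']

-- B reduced to the column-sum normal form (unconditionally)
theorem sumVectors_alt_eq_colForm (poz : Int) (vector : List (List Int)) (lst : List Int) :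
    sumVectors_alt poz vector lst = colForm poz vector lst := by
  simp only [sumVectors_alt, colForm]
  have hmask :
      (PySem.List.pyRange 0 poz 1).foldl
        (fun mask i =>
          PySem.Int.bxor mask
            (parityMask (PySem.List.pyGetD vector (PySem.List.pyGetD lst i 0) [])))
        0
      = ((((PySem.List.pyRange 0 poz 1).map
            (fun i => PySem.List.pyGetD vector (PySem.List.pyGetD lst i 0) [])).foldl
            (fun m v => m ^^^ parityMaskN v) 0 : Nat) : Int) := by
    rw [List.foldl_map]
    have key : ∀ (l : List Int) (b : Nat),
        l.foldl (fun mask i =>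
          PySem.Int.bxor mask
            (parityMask (PySem.List.pyGetD vector (PySem.List.pyGetD lst i 0) []))) (b : Int)
        = ((l.foldl (fun m i => m ^^^ parityMaskN (PySem.List.pyGetD vector (PySem.List.pyGetD lst i 0) [])) b : Nat) : Int) := by
      intro l
      induction l with
      | nil => intro b; simp
      | cons i l ih =>
        intro b
        simp only [List.foldl_cons]
        rw [parityMask_cast, PySem.Int.bxor_natCast, ih]
    exact_mod_cast key _ 0
  rw [hmask]
  apply List.map_congr_left
  intro m _
  generalize ((PySem.List.pyRange 0 poz 1).map
      (fun i => PySem.List.pyGetD vector (PySem.List.pyGetD lst i 0) [])) = rows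
  have hband : PySem.Int.band
        ((((rows.foldl (fun m v => m ^^^ parityMaskN v) 0 : Nat) : Int)) >>> m) 1
      = ((((rows.foldl (fun m v => m ^^^ parityMaskN v) 0) >>> m) &&& 1 : Nat) : Int) := by
    rw [show (((rows.foldl (fun m v => m ^^^ parityMaskN v) 0 : Nat) : Int) >>> m)
        = (((rows.foldl (fun m v => m ^^^ parityMaskN v) 0) >>> m : Nat) : Int) from
          Int.mem_toNat?.mp rfl]
    exact_mod_cast PySem.Int.band_natCast _ 1
  rw [hband]
  have htb := maskFold rows m 0
  simp only [Nat.zero_testBit, Bool.false_xor] at htb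
  have htb2 : (rows.foldl (fun m v => m ^^^ parityMaskN v) 0).testBit m
      = decide ((rows.foldl (fun m v => m ^^^ parityMaskN v) 0) / 2 ^ m % 2 = 1) :=
    Nat.testBit_eq_decide_div_mod_eq
  have hdiv : (rows.foldl (fun m v => m ^^^ parityMaskN v) 0) >>> m &&& 1
      = (rows.foldl (fun m v => m ^^^ parityMaskN v) 0) / 2 ^ m % 2 := by
    rw [Nat.and_one_is_mod, Nat.shiftRight_eq_div_pow]
  rw [hdiv]
  have hm2 : (rows.foldl (fun m v => m ^^^ parityMaskN v) 0) / 2 ^ m % 2 = 0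
      ∨ (rows.foldl (fun m v => m ^^^ parityMaskN v) 0) / 2 ^ m % 2 = 1 := by omega
  rcases mod2_mem (rows.foldl
      (fun acc v => if (m : Int) < (v.length : Int) then acc + PySem.List.pyGetD v (m : Int) 0 else acc) 0)
    with hs | hs <;> rcases hm2 with hn | hn <;> rw [hs, hn]
  · rfl
  · exfalso
    rw [hs] at htb; rw [hn] at htb2
    simp at htb htb2
    simp [htb] at htb2
  · exfalso
    rw [hs] at htb; rw [hn] at htb2
    simp at htb htb2
    simp [htb] at htb2
  · rfl

-- ===== VERDICT (by name: the statement is the Claim_ definition above) =====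
theorem sumVectors_spec : Claim_equal_sumVectors := by
  intro poz vector lst _hdom hpre
  unfold Spec_sumVectors
  rw [sumVectors_eq_colForm poz vector lst hpre.1 hpre.2, sumVectors_alt_eq_colForm]
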